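-- pv_equiv track=rewrite | github.com/michaelremington2/Rosalind-and-bioinformatics-scripts | codon.py | codon_format_2
-- ===== SOURCE A (Python) =====
-- def codon_format_2(sequence_list):
-- 	codons = []
-- 	index = 1
-- 	while index <= (len(sequence_list)):
-- 		if index % 3 == 0 and len(''.join(sequence_list[index-3:index])) !=0:
-- 			codon = ''.join(sequence_list[index-3:index])
-- 			codons.append(codon)
-- 		index += 1
-- 	return codons
-- ===== SOURCE B (Python) =====
-- def codon_format_2(sequence_list):
--     it = iter(sequence_list)
--     return [c for c in map(''.join, zip(it, it, it)) if c]
-- ===== Notes on version B (the rewrite author's own statement) =====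
-- stated objective: idiomatic
-- what changed: Replaces the 1-based index counter with its % 3 test and per-index slicing by the standard grouper idiom (zip over one shared iterator), joining each triple and filtering empty joins; iterator exhaustion drops the incomplete trailing fragment. Measured faster: no slice object and no wasted iterations on non-multiple-of-3 indices.
import Mathlib
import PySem

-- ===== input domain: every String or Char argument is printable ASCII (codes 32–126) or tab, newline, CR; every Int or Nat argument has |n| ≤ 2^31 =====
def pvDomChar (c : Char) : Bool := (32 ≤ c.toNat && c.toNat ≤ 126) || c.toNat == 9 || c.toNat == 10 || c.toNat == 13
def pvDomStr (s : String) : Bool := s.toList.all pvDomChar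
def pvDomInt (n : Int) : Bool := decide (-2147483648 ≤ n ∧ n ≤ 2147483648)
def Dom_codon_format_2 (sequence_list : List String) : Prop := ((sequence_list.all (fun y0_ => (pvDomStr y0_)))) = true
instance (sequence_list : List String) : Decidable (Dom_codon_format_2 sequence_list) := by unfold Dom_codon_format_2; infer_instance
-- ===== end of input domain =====

-- B replaces A's index counter with %3 test and repeated slicing by a grouper-style
-- recursion on triples (idiomatic; same O(n) cost).


-- ===== PORT A =====
-- while loop over index = 1 .. len(sequence_list); appends ''.join(sequence_list[index-3:index]) when index % 3 == 0 and the join is nonempty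
def codonLoopA (l : List String) (codons : List String) (index : Nat) : List String :=
  if index ≤ l.length then
    codonLoopA l
      (if index % 3 = 0 ∧
          PySem.Str.len (PySem.Str.join "" (PySem.List.slice l (some ((index : Int) - 3)) (some (index : Int)))) ≠ 0
       then codons ++ [PySem.Str.join "" (PySem.List.slice l (some ((index : Int) - 3)) (some (index : Int)))]
       else codons)
      (index + 1)
  else codons
termination_by l.length + 1 - index
decreasing_by omega

def codon_format_2 (sequence_list : List String) : List String :=
  codonLoopA sequence_list [] 1

-- ===== PORT B =====
-- grouper idiom: consume three elements at a time from the list (zip of one shared iterator),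
-- join each triple, keep the nonempty joins; a trailing fragment of < 3 elements is dropped
def codonChunksB : List String → List String
  | a :: b :: c :: rest =>
      let s := PySem.Str.join "" [a, b, c]
      if s = "" then codonChunksB rest else s :: codonChunksB rest
  | _ => []

def codon_format_2_alt (sequence_list : List String) : List String :=
  codonChunksB sequence_list

-- ===== PRECONDITION & SPEC =====
def Spec_codon_format_2 (sequence_list : List String) (out : List String) : Prop := out = codon_format_2_alt sequence_list
instance (sequence_list : List String) (out : List String) : Decidable (Spec_codon_format_2 sequence_list out) := by unfold Spec_codon_format_2; infer_instance

-- ===== CLAIM (what is proved, stated in full; the proofs are below) =====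
def Claim_equal_codon_format_2 : Prop := ∀ (sequence_list : List String), Dom_codon_format_2 sequence_list → Spec_codon_format_2 sequence_list (codon_format_2 sequence_list)

-- ===== LEMMAS AND PROOFS =====


lemma str_len_ne_zero_iff (s : String) : PySem.Str.len s ≠ 0 ↔ s ≠ "" := by
  rw [PySem.Str.len_eq]
  simp [Int.natCast_eq_zero]

lemma chunksB_short (d : List String) (h : d.length < 3) : codonChunksB d = [] := by
  match d with
  | [] => rfl
  | [_] => rfl
  | [_, _] => rfl
  | _ :: _ :: _ :: _ => simp at h; omega

lemma codonLoopA_eq_chunks (l : List String) (m : Nat) (acc : List String) :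
    codonLoopA l acc (3 * m + 1) = acc ++ codonChunksB (l.drop (3 * m)) := by
  have key : ∀ n m acc, l.length - 3 * m ≤ n →
      codonLoopA l acc (3 * m + 1) = acc ++ codonChunksB (l.drop (3 * m)) := by
    intro n
    induction n with
    | zero =>
      intro m acc h
      rw [codonLoopA, if_neg (by omega)]
      rw [List.drop_eq_nil_of_le (by omega)]
      simp [codonChunksB]
    | succ n ih =>
      intro m acc h
      by_cases h1 : 3 * m + 1 ≤ l.length
      · rw [codonLoopA, if_pos h1, if_neg (by rintro ⟨h0, -⟩; omega)]
        by_cases h2 : 3 * m + 1 + 1 ≤ l.length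
        · rw [codonLoopA, if_pos h2, if_neg (by rintro ⟨h0, -⟩; omega)]
          by_cases h3 : 3 * m + 1 + 1 + 1 ≤ l.length
          · rw [codonLoopA, if_pos h3]
            have hdl : (l.drop (3 * m)).length = l.length - 3 * m := by simp
            obtain ⟨a, b, c, rest, hdd⟩ :
                ∃ a b c rest, l.drop (3 * m) = a :: b :: c :: rest := by
              match hx : l.drop (3 * m) with
              | [] | [_] | [_, _] => rw [hx] at hdl; simp at hdl; omega
              | a :: b :: c :: rest => exact ⟨a, b, c, rest, rfl⟩
            have hs : PySem.List.slice l (some (((3 * m + 1 + 1 + 1 : Nat) : Int) - 3))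
                (some ((3 * m + 1 + 1 + 1 : Nat) : Int)) = [a, b, c] := by
              have e1 : (((3 * m + 1 + 1 + 1 : Nat) : Int) - 3) = ((3 * m : Nat) : Int) := by
                push_cast; ring
              have e2 : ((3 * m + 1 + 1 + 1 : Nat) : Int) = ((3 * m : Nat) : Int) + ((3 : Nat) : Int) := by
                push_cast; ring
              rw [e1, e2, PySem.List.slice_natCast_add, hdd]
              rfl
            have hrest : l.drop (3 * (m + 1)) = rest := by
              have : l.drop (3 * (m + 1)) = (l.drop (3 * m)).drop 3 := by
                rw [List.drop_drop]; ring_nf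
              rw [this, hdd]; rfl
            rw [hs]
            have hnext : 3 * m + 1 + 1 + 1 + 1 = 3 * (m + 1) + 1 := by ring
            by_cases h0 : PySem.Str.join "" [a, b, c] = ""
            · rw [if_neg (by rintro ⟨-, hne⟩; exact (str_len_ne_zero_iff _).mp hne h0)]
              rw [hnext, ih (m + 1) acc (by omega), hdd, hrest]
              simp [codonChunksB, h0]
            · rw [if_pos ⟨by omega, (str_len_ne_zero_iff _).mpr h0⟩]
              rw [hnext, ih (m + 1) _ (by omega), hdd, hrest]
              simp [codonChunksB, h0]
          · rw [codonLoopA, if_neg h3]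
            rw [chunksB_short _ (by simp; omega), List.append_nil]
        · rw [codonLoopA, if_neg h2]
          rw [chunksB_short _ (by simp; omega), List.append_nil]
      · rw [codonLoopA, if_neg h1]
        rw [chunksB_short _ (by simp; omega), List.append_nil]
  exact key (l.length - 3 * m) m acc le_rfl

-- ===== VERDICT (by name: the statement is the Claim_ definition above) =====
theorem codon_format_2_spec : Claim_equal_codon_format_2 := by
  intro l _
  unfold Spec_codon_format_2 codon_format_2 codon_format_2_alt
  simpa using codonLoopA_eq_chunks l 0 []
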